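-- pv_equiv track=rewrite | github.com/Dex-Swaraj/NLP-labs | practical7_nltk_preprocessing.py | analyze_pos_distribution
-- ===== SOURCE A (Python) =====
-- from collections import Counter, defaultdict
--
-- def analyze_pos_distribution(pos_tags):
--     """EXTRA: Analyze POS tag distribution and patterns"""
--     tag_counts = Counter(tag for word, tag in pos_tags)
--
--     # POS categories
--     categories = {
--         'Nouns': ['NN', 'NNS', 'NNP', 'NNPS'],
--         'Verbs': ['VB', 'VBD', 'VBG', 'VBN', 'VBP', 'VBZ'],
--         'Adjectives': ['JJ', 'JJR', 'JJS'],
--         'Adverbs': ['RB', 'RBR', 'RBS'],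
--         'Pronouns': ['PRP', 'PRP$'],
--         'Prepositions': ['IN'],
--         'Conjunctions': ['CC'],
--         'Determiners': ['DT']
--     }
--
--     category_counts = {}
--     for category, tags in categories.items():
--         count = sum(tag_counts.get(tag, 0) for tag in tags)
--         category_counts[category] = count
--
--     return tag_counts, category_counts
-- ===== SOURCE B (Python) =====
-- from collections import Counter
--
-- def analyze_pos_distribution(pos_tags):
--     """EXTRA: Analyze POS tag distribution and patterns"""
--     tag_counts = Counter(tag for word, tag in pos_tags)
--
--     categories = {
--         'Nouns': ['NN', 'NNS', 'NNP', 'NNPS'],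
--         'Verbs': ['VB', 'VBD', 'VBG', 'VBN', 'VBP', 'VBZ'],
--         'Adjectives': ['JJ', 'JJR', 'JJS'],
--         'Adverbs': ['RB', 'RBR', 'RBS'],
--         'Pronouns': ['PRP', 'PRP$'],
--         'Prepositions': ['IN'],
--         'Conjunctions': ['CC'],
--         'Determiners': ['DT']
--     }
--
--     # inverse index: tag -> category name
--     tag_to_cat = {tag: cat for cat, tags in categories.items() for tag in tags}
--
--     # seed every category (in the original order) with 0, then one pass over the counts
--     category_counts = {cat: 0 for cat in categories}
--     for tag, cnt in tag_counts.items():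
--         cat = tag_to_cat.get(tag)
--         if cat is not None:
--             category_counts[cat] += cnt
--
--     return tag_counts, category_counts
-- ===== Notes on version B (the rewrite author's own statement) =====
-- stated objective: alternative
-- what changed: Replaces the per-category inner scan (sum of tag_counts.get over each category's tag list) by an inverse tag->category index plus a zero-seeded category dict updated in a single pass over tag_counts.items().
import Mathlib
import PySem

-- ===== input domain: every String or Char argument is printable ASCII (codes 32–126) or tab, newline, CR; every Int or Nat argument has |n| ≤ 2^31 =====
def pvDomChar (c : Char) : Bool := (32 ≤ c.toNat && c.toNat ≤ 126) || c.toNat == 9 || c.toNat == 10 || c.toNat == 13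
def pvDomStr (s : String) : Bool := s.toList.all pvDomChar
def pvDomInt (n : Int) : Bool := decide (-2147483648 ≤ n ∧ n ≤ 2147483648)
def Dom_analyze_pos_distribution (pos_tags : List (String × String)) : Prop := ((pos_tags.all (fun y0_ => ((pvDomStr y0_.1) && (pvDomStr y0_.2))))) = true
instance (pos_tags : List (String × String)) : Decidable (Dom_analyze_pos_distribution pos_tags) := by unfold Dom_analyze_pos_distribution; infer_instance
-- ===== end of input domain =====

-- B replaces A's per-category inner scan by an inverse tag→category index and a single pass
-- over the counter's items into a zero-seeded category dict (objective: alternative decomposition).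

-- the POS category table both Python versions contain verbatim
def pvCategories : List (String × List String) :=
  [("Nouns", ["NN", "NNS", "NNP", "NNPS"]),
   ("Verbs", ["VB", "VBD", "VBG", "VBN", "VBP", "VBZ"]),
   ("Adjectives", ["JJ", "JJR", "JJS"]),
   ("Adverbs", ["RB", "RBR", "RBS"]),
   ("Pronouns", ["PRP", "PRP$"]),
   ("Prepositions", ["IN"]),
   ("Conjunctions", ["CC"]),
   ("Determiners", ["DT"])]

-- ===== PORT A =====
def analyze_pos_distribution (pos_tags : List (String × String)) : (List (String × Int)) × (List (String × Int)) :=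
  let tag_counts := PySem.Dict.counter (pos_tags.map (fun p => p.2))
  let category_counts :=
    pvCategories.foldl
      (fun d p => d.insert p.1 ((p.2.map (fun t => tag_counts.getD t 0)).sum))
      PySem.Dict.empty
  (tag_counts.items, category_counts.items)

-- ===== PORT B =====
-- tag_to_cat = {tag: cat for cat, tags in categories.items() for tag in tags}
def pvTagToCat : PySem.Dict String String :=
  pvCategories.foldl (fun d p => p.2.foldl (fun d t => d.insert t p.1) d) PySem.Dict.empty

def analyze_pos_distribution_alt (pos_tags : List (String × String)) : (List (String × Int)) × (List (String × Int)) :=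
  let tag_counts := PySem.Dict.counter (pos_tags.map (fun p => p.2))
  let seeded := pvCategories.foldl (fun d p => d.insert p.1 (0 : Int)) PySem.Dict.empty
  let category_counts :=
    tag_counts.items.foldl
      (fun d p =>
        match pvTagToCat.get? p.1 with
        | some cat => d.modify cat 0 (fun x => x + p.2)
        | none => d)
      seeded
  (tag_counts.items, category_counts.items)

-- ===== PRECONDITION & SPEC =====
def Spec_analyze_pos_distribution (pos_tags : List (String × String)) (out : (List (String × Int)) × (List (String × Int))) : Prop := out = analyze_pos_distribution_alt pos_tags
instance (pos_tags : List (String × String)) (out : (List (String × Int)) × (List (String × Int))) : Decidable (Spec_analyze_pos_distribution pos_tags out) := by unfold Spec_analyze_pos_distribution; infer_instance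

-- ===== CLAIM (what is proved, stated in full; the proofs are below) =====
def Claim_equal_analyze_pos_distribution : Prop := ∀ (pos_tags : List (String × String)), Dom_analyze_pos_distribution pos_tags → Spec_analyze_pos_distribution pos_tags (analyze_pos_distribution pos_tags)

-- ===== LEMMAS AND PROOFS =====

-- every category the inverse index can produce is a key of the seeded dict
lemma t2c_val_mem (t c : String) (h : pvTagToCat.get? t = some c) :
    c ∈ pvCategories.map (fun p => p.1) := by
  rw [PySem.Dict.get?_eq_some_iff_mem_items _ _ _ (by decide)] at h
  simp only [show pvTagToCat.items = [("NN","Nouns"),("NNS","Nouns"),("NNP","Nouns"),("NNPS","Nouns"),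
      ("VB","Verbs"),("VBD","Verbs"),("VBG","Verbs"),("VBN","Verbs"),("VBP","Verbs"),("VBZ","Verbs"),
      ("JJ","Adjectives"),("JJR","Adjectives"),("JJS","Adjectives"),
      ("RB","Adverbs"),("RBR","Adverbs"),("RBS","Adverbs"),
      ("PRP","Pronouns"),("PRP$","Pronouns"),("IN","Prepositions"),("CC","Conjunctions"),("DT","Determiners")] from by decide,
    List.mem_cons, Prod.mk.injEq, List.not_mem_nil, or_false] at h
  simp only [pvCategories, List.map, List.mem_cons, List.not_mem_nil, or_false]
  tauto

-- the inverse index sends t to category c iff t is in c's tag list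
lemma t2c_get?_iff (t c : String) (ts : List String) (hmem : (c, ts) ∈ pvCategories) :
    (pvTagToCat.get? t = some c ↔ t ∈ ts) := by
  rw [PySem.Dict.get?_eq_some_iff_mem_items _ _ _ (by decide)]
  fin_cases hmem <;>
    simp only [show pvTagToCat.items = [("NN","Nouns"),("NNS","Nouns"),("NNP","Nouns"),("NNPS","Nouns"),
      ("VB","Verbs"),("VBD","Verbs"),("VBG","Verbs"),("VBN","Verbs"),("VBP","Verbs"),("VBZ","Verbs"),
      ("JJ","Adjectives"),("JJR","Adjectives"),("JJS","Adjectives"),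
      ("RB","Adverbs"),("RBR","Adverbs"),("RBS","Adverbs"),
      ("PRP","Pronouns"),("PRP$","Pronouns"),("IN","Prepositions"),("CC","Conjunctions"),("DT","Determiners")] from by decide,
      List.mem_cons, List.not_mem_nil, Prod.mk.injEq, or_false] <;>
    simp

-- the B loop only modifies keys already present, so the key list is unchanged
lemma keys_bfold (l : List (String × Int)) (d : PySem.Dict String Int)
    (hk : ∀ t c, pvTagToCat.get? t = some c → c ∈ d.keys) :
    (l.foldl (fun d p =>
        match pvTagToCat.get? p.1 with
        | some cat => d.modify cat 0 (fun x => x + p.2)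
        | none => d) d).keys = d.keys := by
  induction l generalizing d with
  | nil => rfl
  | cons p rest ih =>
      simp only [List.foldl_cons]
      cases hg : pvTagToCat.get? p.1 with
      | none => exact ih d hk
      | some cat =>
          have hc : d.contains cat = true := by
            rw [PySem.Dict.contains_iff_mem_keys]; exact hk _ _ hg
          have hkeys : (d.modify cat 0 (fun x => x + p.2)).keys = d.keys := by
            rw [PySem.Dict.keys_modify, PySem.Dict.keys_insert_of_contains _ _ hc]
          rw [ih _ (by intro t c h; rw [hkeys]; exact hk t c h), hkeys]

-- value of the B loop at a category key
lemma getD_bfold (l : List (String × Int)) (d : PySem.Dict String Int) (c : String) :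
    (l.foldl (fun d p =>
        match pvTagToCat.get? p.1 with
        | some cat => d.modify cat 0 (fun x => x + p.2)
        | none => d) d).getD c 0
      = d.getD c 0 + ((l.filter (fun p => pvTagToCat.get? p.1 == some c)).map (fun p => p.2)).sum := by
  induction l generalizing d with
  | nil => simp
  | cons p rest ih =>
      simp only [List.foldl_cons, List.filter_cons]
      cases hg : pvTagToCat.get? p.1 with
      | none => simp [ih]
      | some cat =>
          by_cases hc : cat = c
          · subst hc
            rw [ih]
            simp [PySem.Dict.getD_modify_self]
            ring
          · rw [ih]
            rw [PySem.Dict.getD_modify_of_ne _ _ _ (Ne.symm hc)]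
            simp [hc]

-- drop zero terms outside a filter
lemma sum_map_filter_of_zero {α : Type} (l : List α) (p : α → Bool) (f : α → Int)
    (h : ∀ x ∈ l, p x = false → f x = 0) :
    (l.map f).sum = ((l.filter p).map f).sum := by
  induction l with
  | nil => rfl
  | cons a t ih =>
      simp only [List.map_cons, List.sum_cons, List.filter_cons]
      by_cases hp : p a = true
      · simp [hp, ih (fun x hx => h x (List.mem_cons_of_mem _ hx))]
      · have hpa : p a = false := by simpa using hp
        have := h a List.mem_cons_self hpa
        simp [hpa, this, ih (fun x hx => h x (List.mem_cons_of_mem _ hx))]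

-- the seeded category dict carries value 0 at every category key
lemma pvSeedZero (c : String)
    (hc : c ∈ (["Nouns", "Verbs", "Adjectives", "Adverbs", "Pronouns", "Prepositions", "Conjunctions", "Determiners"] : List String)) :
    (pvCategories.foldl (fun d p => d.insert p.1 (0 : Int)) PySem.Dict.empty).getD c 0 = 0 := by
  fin_cases hc <;> decide

-- per-category agreement of the two computations
lemma cat_sum_eq (xs : List String) (c : String) (ts : List String)
    (hnd : ts.Nodup) (hiff : ∀ t, pvTagToCat.get? t = some c ↔ t ∈ ts) :
    ((ts.map (fun t => (PySem.Dict.counter xs).getD t 0)).sum : Int)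
      = (((PySem.Dict.counter xs).items.filter (fun p => pvTagToCat.get? p.1 == some c)).map (fun p => p.2)).sum := by
  have hS : (PySem.Set.ofList xs).Nodup := PySem.Set.nodup_ofList xs
  rw [PySem.Dict.items_counter, List.filter_map, List.map_map]
  have hfil : ((PySem.Set.ofList xs).filter
        ((fun p => pvTagToCat.get? p.1 == some c) ∘ (fun k => (k, (List.count k xs : Int)))))
      = (PySem.Set.ofList xs).filter (fun t => decide (t ∈ ts)) := by
    apply List.filter_congr
    intro t _
    by_cases h : t ∈ ts
    · simp [h, (hiff t).mpr h]
    · have hne : pvTagToCat.get? t ≠ some c := fun hc => h ((hiff t).mp hc)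
      simp [h, hne]
  rw [hfil]
  simp only [PySem.Dict.getD_counter]
  have step1 : ((ts.map (fun t => (List.count t xs : Int))).sum)
      = ((ts.filter (fun t => decide (t ∈ PySem.Set.ofList xs))).map (fun t => (List.count t xs : Int))).sum := by
    apply sum_map_filter_of_zero
    intro t _ hf
    have : t ∉ xs := by
      have := (PySem.Set.mem_ofList xs t)
      simp at hf
      simpa [this] using hf
    simp [List.count_eq_zero.mpr this]
  have hperm : (ts.filter (fun t => decide (t ∈ PySem.Set.ofList xs))).Perm
      ((PySem.Set.ofList xs).filter (fun t => decide (t ∈ ts))) := by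
    rw [List.perm_ext_iff_of_nodup (hnd.filter _) (hS.filter _)]
    intro a
    simp only [List.mem_filter, decide_eq_true_eq]
    tauto
  rw [step1, (hperm.map _).sum_eq]
  simp [Function.comp_def]

-- the second returned component agrees
lemma second_eq (xs : List String) :
    (pvCategories.foldl
        (fun d p => d.insert p.1 ((p.2.map (fun t => (PySem.Dict.counter xs).getD t 0)).sum))
        PySem.Dict.empty).items
      = ((PySem.Dict.counter xs).items.foldl
          (fun d p =>
            match pvTagToCat.get? p.1 with
            | some cat => d.modify cat 0 (fun x => x + p.2)
            | none => d)
          (pvCategories.foldl (fun d p => d.insert p.1 (0 : Int)) PySem.Dict.empty)).items := by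
  -- A's side: inserts of fresh distinct keys append
  rw [PySem.Dict.items_foldl_insert_fresh _ _ _ _ (by decide) (by decide)]
  -- B's side: keys stay the seeded category names
  have hkeys : ((PySem.Dict.counter xs).items.foldl
          (fun d p =>
            match pvTagToCat.get? p.1 with
            | some cat => d.modify cat 0 (fun x => x + p.2)
            | none => d)
          (pvCategories.foldl (fun d p => d.insert p.1 (0 : Int)) PySem.Dict.empty)).keys
      = (pvCategories.foldl (fun d p => d.insert p.1 (0 : Int)) PySem.Dict.empty).keys := by
    apply keys_bfold
    intro t c h
    rw [show (pvCategories.foldl (fun d p => d.insert p.1 (0 : Int)) PySem.Dict.empty).keys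
        = ["Nouns", "Verbs", "Adjectives", "Adverbs", "Pronouns", "Prepositions", "Conjunctions", "Determiners"] from by decide]
    simpa [pvCategories] using t2c_val_mem t c h
  have hnodup : ((PySem.Dict.counter xs).items.foldl
          (fun d p =>
            match pvTagToCat.get? p.1 with
            | some cat => d.modify cat 0 (fun x => x + p.2)
            | none => d)
          (pvCategories.foldl (fun d p => d.insert p.1 (0 : Int)) PySem.Dict.empty)).keys.Nodup := by
    rw [hkeys]; decide
  rw [PySem.Dict.items_eq_map_keys _ hnodup 0, hkeys]
  simp only [getD_bfold]
  rw [show (pvCategories.foldl (fun d p => d.insert p.1 (0 : Int)) PySem.Dict.empty).keys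
      = pvCategories.map (fun p => p.1) from by decide]
  rw [List.map_map, show (PySem.Dict.empty : PySem.Dict String Int).items = [] from rfl,
    List.nil_append]
  apply List.map_congr_left
  intro p hp
  simp only [pvCategories, List.mem_cons, List.not_mem_nil, or_false] at hp
  rcases hp with rfl | rfl | rfl | rfl | rfl | rfl | rfl | rfl
  · rw [cat_sum_eq xs "Nouns" (["NN", "NNS", "NNP", "NNPS"] : List String) (by decide) (fun t => t2c_get?_iff t "Nouns" ["NN", "NNS", "NNP", "NNPS"] (by decide))]
    simp only [Function.comp_apply]
    rw [pvSeedZero "Nouns" (by decide), zero_add]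
  · rw [cat_sum_eq xs "Verbs" (["VB", "VBD", "VBG", "VBN", "VBP", "VBZ"] : List String) (by decide) (fun t => t2c_get?_iff t "Verbs" ["VB", "VBD", "VBG", "VBN", "VBP", "VBZ"] (by decide))]
    simp only [Function.comp_apply]
    rw [pvSeedZero "Verbs" (by decide), zero_add]
  · rw [cat_sum_eq xs "Adjectives" (["JJ", "JJR", "JJS"] : List String) (by decide) (fun t => t2c_get?_iff t "Adjectives" ["JJ", "JJR", "JJS"] (by decide))]
    simp only [Function.comp_apply]
    rw [pvSeedZero "Adjectives" (by decide), zero_add]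
  · rw [cat_sum_eq xs "Adverbs" (["RB", "RBR", "RBS"] : List String) (by decide) (fun t => t2c_get?_iff t "Adverbs" ["RB", "RBR", "RBS"] (by decide))]
    simp only [Function.comp_apply]
    rw [pvSeedZero "Adverbs" (by decide), zero_add]
  · rw [cat_sum_eq xs "Pronouns" (["PRP", "PRP$"] : List String) (by decide) (fun t => t2c_get?_iff t "Pronouns" ["PRP", "PRP$"] (by decide))]
    simp only [Function.comp_apply]
    rw [pvSeedZero "Pronouns" (by decide), zero_add]
  · rw [cat_sum_eq xs "Prepositions" (["IN"] : List String) (by decide) (fun t => t2c_get?_iff t "Prepositions" ["IN"] (by decide))]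
    simp only [Function.comp_apply]
    rw [pvSeedZero "Prepositions" (by decide), zero_add]
  · rw [cat_sum_eq xs "Conjunctions" (["CC"] : List String) (by decide) (fun t => t2c_get?_iff t "Conjunctions" ["CC"] (by decide))]
    simp only [Function.comp_apply]
    rw [pvSeedZero "Conjunctions" (by decide), zero_add]
  · rw [cat_sum_eq xs "Determiners" (["DT"] : List String) (by decide) (fun t => t2c_get?_iff t "Determiners" ["DT"] (by decide))]
    simp only [Function.comp_apply]
    rw [pvSeedZero "Determiners" (by decide), zero_add]

-- ===== VERDICT (by name: the statement is the Claim_ definition above) =====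
set_option maxHeartbeats 1000000 in
theorem analyze_pos_distribution_spec : Claim_equal_analyze_pos_distribution := by
  intro pos_tags _
  show analyze_pos_distribution pos_tags = analyze_pos_distribution_alt pos_tags
  simp only [analyze_pos_distribution, analyze_pos_distribution_alt]
  rw [second_eq (pos_tags.map (fun p => p.2))]
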